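-- pv_equiv track=rewrite | github.com/miliar/Code_Jam_Webscraper | solutions_python/Problem_181/1014.py | calculate
-- ===== SOURCE A (Python) =====
-- def calculate(t):
--
--     result = t[0]
--
--     for i in t[1:]:
--         if i < result[0]:
--             result = result + i
--         else:
--             result = i + result
--
--     return result
-- ===== SOURCE B (Python) =====
-- def calculate(t):
--     # the "current first char" of A's growing string equals the running maximum
--     # of the first characters of t[0..k]; precompute that prefix maximum, then
--     # classify each element against it and assemble once.
--     m = ''
--     runmax = []
--     for s in t[:-1]:
--         m = max(m, s[:1])
--         runmax.append(m)
--     pairs = list(zip(t[1:], runmax))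
--     front = [s for s, m in pairs if s[:1] >= m]
--     back = [s for s, m in pairs if s[:1] < m]
--     return ''.join(reversed(front)) + t[0] + ''.join(back)
-- ===== Notes on version B (the rewrite author's own statement) =====
-- stated objective: faster
-- what changed: Replaces A's threaded prepend/append accumulator (read back through result[0]) with a reduction to a prefix running maximum of first characters, computed independently of any placement decision, followed by two filter passes and one assembly; total cost drops from quadratic string building to linear.
import Mathlib
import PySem

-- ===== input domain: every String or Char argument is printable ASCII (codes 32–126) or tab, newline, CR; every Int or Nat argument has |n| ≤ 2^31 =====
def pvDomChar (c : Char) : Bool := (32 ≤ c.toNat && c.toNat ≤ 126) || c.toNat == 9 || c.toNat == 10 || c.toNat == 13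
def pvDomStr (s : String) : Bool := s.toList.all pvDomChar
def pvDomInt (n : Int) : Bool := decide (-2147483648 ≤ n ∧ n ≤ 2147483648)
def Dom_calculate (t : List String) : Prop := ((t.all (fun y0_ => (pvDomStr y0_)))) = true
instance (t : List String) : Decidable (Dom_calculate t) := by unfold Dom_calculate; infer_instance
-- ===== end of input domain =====

-- B replaces A's threaded prepend/append accumulator with a precomputed prefix running
-- maximum of first characters, two filter passes and one assembly (linear instead of quadratic).

-- ===== PORT A =====
def calculate (t : List String) : String :=
  match t with
  | [] => ""            -- Python raises IndexError on t[0]; excluded by Pre_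
  | r :: rest =>
    rest.foldl (fun result i =>
      match PySem.Str.pyGet? result 0 with
      | none => result  -- Python raises IndexError on result[0]; excluded by Pre_
      | some c => if i < String.ofList [c] then result ++ i else i ++ result) r

-- ===== PORT B =====
def calculate_alt (t : List String) : String :=
  let st := (PySem.List.slice t none (some (-1))).foldl
    (fun (st : String × List String) s =>
      let m := max st.1 (PySem.Str.slice s (some 0) (some 1))
      (m, st.2 ++ [m])) ("", [])
  let pairs := (PySem.List.slice t (some 1) none).zip st.2
  let front := (pairs.filter (fun p => PySem.Str.slice p.1 (some 0) (some 1) ≥ p.2)).map Prod.fst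
  let back := (pairs.filter (fun p => PySem.Str.slice p.1 (some 0) (some 1) < p.2)).map Prod.fst
  PySem.Str.join "" front.reverse ++
    (match PySem.List.pyGet? t 0 with
     | some x => x
     | none => "")      -- Python raises IndexError on t[0]; excluded by Pre_
    ++ PySem.Str.join "" back

-- ===== PRECONDITION & SPEC =====
-- Pre_ excludes exactly the inputs on which A raises IndexError: the empty list,
-- and lists of length ≥ 2 whose first element is "".
def Pre_calculate (t : List String) : Prop :=
  t ≠ [] ∧ (t.tail ≠ [] → t.headD "" ≠ "")
instance (t : List String) : Decidable (Pre_calculate t) := by unfold Pre_calculate; infer_instance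

def pvWitness_calculate : List String := ["ba", "a", "c"]

def Spec_calculate (t : List String) (out : String) : Prop := out = calculate_alt t
instance (t : List String) (out : String) : Decidable (Spec_calculate t out) := by unfold Spec_calculate; infer_instance

-- ===== CLAIM (what is proved, stated in full; the proofs are below) =====
def Claim_equal_calculate : Prop := ∀ (t : List String), Dom_calculate t → Pre_calculate t → Spec_calculate t (calculate t)

-- ===== LEMMAS AND PROOFS =====

-- ''.join with empty separator is concatenation
theorem pvJoinFlat (l : List (List Char)) : PySem.Chars.join [] l = l.flatten := by
  induction l with
  | nil => rfl
  | cons x xs ih =>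
    cases xs with
    | nil => simp [PySem.Chars.join, List.intercalate]
    | cons y ys =>
      rw [PySem.Chars.join_cons_cons]
      simp [PySem.Chars.join, List.intercalate] at ih ⊢
      simp [ih]

theorem pvJoin_append_singleton (l : List String) (x : String) :
    PySem.Str.join "" (l ++ [x]) = PySem.Str.join "" l ++ x := by
  simp [PySem.Str.join, pvJoinFlat]

theorem pvJoin_cons (x : String) (l : List String) :
    PySem.Str.join "" (x :: l) = x ++ PySem.Str.join "" l := by
  simp [PySem.Str.join, pvJoinFlat]

theorem pvSlice01 (s : String) (c : Char) (cs : List Char) (h : s.toList = c :: cs) :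
    PySem.Str.slice s (some 0) (some 1) = String.ofList [c] := by
  apply String.toList_injective ?_
  simp [PySem.Str.toList_slice, h, PySem.List.slice]

-- s < [c]  ↔  s[:1] < [c]  (string compare against a one-char string looks only at s[:1])
theorem pvLtSlice (i : String) (c : Char) :
    (i < String.ofList [c]) ↔ (PySem.Str.slice i (some 0) (some 1) < String.ofList [c]) := by
  cases h : i.toList with
  | nil =>
    have hi : i = "" := String.toList_injective (by simp [h])
    subst hi
    constructor <;> intro _ <;>
      exact String.lt_iff_toList_lt.mpr
        (by simp [PySem.Str.toList_slice, PySem.List.slice, List.nil_lt_cons])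
  | cons d ds =>
    rw [pvSlice01 i d ds h, String.lt_iff_toList_lt, String.lt_iff_toList_lt, h]
    simp only [String.toList_ofList]
    constructor
    · intro hlt
      cases hlt with
      | rel hdc => exact List.Lex.rel hdc
      | cons htail => exact absurd htail (by intro hx; cases hx)
    · intro hlt
      cases hlt with
      | rel hdc => exact List.Lex.rel hdc
      | cons htail => exact absurd htail (by intro hx; cases hx)

-- an element that is not < a one-char string is nonempty
theorem pvNeLt (c : Char) (i : String) (h : ¬ i < String.ofList [c]) : i.toList ≠ [] := by
  intro he
  exact h (String.lt_iff_toList_lt.mpr (by rw [he]; simp))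

-- the (element, running-max) pairs, threaded directly
def pvRmx (m : String) (l : List String) : List (String × String) :=
  match l with
  | [] => []
  | i :: r => (i, m) :: pvRmx (max m (PySem.Str.slice i (some 0) (some 1))) r

-- B's fold builds acc ++ the list of running maxima
theorem pvRunFold (l : List String) : ∀ (m : String) (acc : List String),
    (l.foldl (fun (st : String × List String) s =>
        let m' := max st.1 (PySem.Str.slice s (some 0) (some 1))
        (m', st.2 ++ [m'])) (m, acc)).2 =
    acc ++ (pvRmx m l).map (fun p => max p.2 (PySem.Str.slice p.1 (some 0) (some 1))) := by
  induction l with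
  | nil => intro m acc; simp [pvRmx]
  | cons i r ih =>
    intro m acc
    simp only [List.foldl_cons, pvRmx, List.map_cons]
    rw [ih]
    simp

-- zipping the tail with the running maxima of the dropLast gives the threaded pairs
theorem pvZipRunmax (l : List String) : ∀ (m : String),
    l.zip (m :: (pvRmx m l.dropLast).map
        (fun p => max p.2 (PySem.Str.slice p.1 (some 0) (some 1)))) =
    pvRmx m l := by
  induction l with
  | nil => intro m; simp [pvRmx]
  | cons i r ih =>
    intro m
    cases r with
    | nil => simp [pvRmx]
    | cons j r' =>
      rw [List.dropLast_cons₂]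
      conv_lhs => rw [pvRmx, List.map_cons]
      rw [List.zip_cons_cons, ih]
      conv_rhs => rw [pvRmx]

-- A's loop equals the filter-based assembly around the current accumulator
theorem pvKey (rest : List String) :
    ∀ (result : String) (c : Char) (cs : List Char), result.toList = c :: cs →
    rest.foldl (fun result i =>
      match PySem.Str.pyGet? result 0 with
      | none => result
      | some c => if i < String.ofList [c] then result ++ i else i ++ result) result =
    PySem.Str.join "" (((pvRmx (String.ofList [c]) rest).filter
        (fun p => PySem.Str.slice p.1 (some 0) (some 1) ≥ p.2)).map Prod.fst).reverse
      ++ result ++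
    PySem.Str.join "" (((pvRmx (String.ofList [c]) rest).filter
        (fun p => PySem.Str.slice p.1 (some 0) (some 1) < p.2)).map Prod.fst) := by
  induction rest with
  | nil => intro result c cs h1; simp [pvRmx, PySem.Str.join]
  | cons i rest ih =>
    intro result c cs h1
    have hget : PySem.Str.pyGet? result 0 = some c := by
      simp [PySem.Str.pyGet?, h1, PySem.List.pyGet?, PySem.List.pyIdx?]
    simp only [List.foldl_cons, hget]
    by_cases hc : i < String.ofList [c]
    · -- back: i[:1] < m, the running maximum stays m
      have hs : PySem.Str.slice i (some 0) (some 1) < String.ofList [c] := (pvLtSlice i c).mp hc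
      have hmax : max (String.ofList [c]) (PySem.Str.slice i (some 0) (some 1)) = String.ofList [c] :=
        max_eq_left (le_of_lt hs)
      have h1' : (result ++ i).toList = c :: (cs ++ i.toList) := by simp [h1]
      rw [if_pos hc, ih (result ++ i) c (cs ++ i.toList) h1']
      conv_rhs => rw [pvRmx]
      rw [hmax, List.filter_cons, List.filter_cons]
      simp only [decide_eq_true_eq]
      rw [if_neg (not_le.mpr hs), if_pos hs, List.map_cons, pvJoin_cons]
      simp [String.append_assoc]
    · -- front: i is nonempty, i[:1] ≥ m, the running maximum becomes i[:1]
      obtain ⟨d, ds, hd⟩ : ∃ d ds, i.toList = d :: ds := by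
        cases hi : i.toList with
        | nil => exact absurd hi (pvNeLt c i hc)
        | cons d ds => exact ⟨d, ds, rfl⟩
      have hs : PySem.Str.slice i (some 0) (some 1) = String.ofList [d] := pvSlice01 i d ds hd
      have hge : String.ofList [c] ≤ PySem.Str.slice i (some 0) (some 1) :=
        le_of_not_gt (fun hlt => hc ((pvLtSlice i c).mpr hlt))
      have hmax : max (String.ofList [c]) (PySem.Str.slice i (some 0) (some 1)) =
          PySem.Str.slice i (some 0) (some 1) := max_eq_right hge
      have h1' : (i ++ result).toList = d :: (ds ++ result.toList) := by simp [hd]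
      rw [if_neg hc, ih (i ++ result) d (ds ++ result.toList) h1']
      conv_rhs => rw [pvRmx]
      rw [hmax, hs, List.filter_cons, List.filter_cons]
      simp only [decide_eq_true_eq]
      rw [if_pos (ge_iff_le.mpr (hs ▸ hge)), if_neg (not_lt.mpr (hs ▸ hge)),
        List.map_cons, List.reverse_cons, pvJoin_append_singleton]
      simp [String.append_assoc]

-- ===== VERDICT (by name: the statement is the Claim_ definition above) =====
theorem calculate_spec : Claim_equal_calculate := by
  intro t _ hpre
  unfold Spec_calculate
  obtain ⟨hne, hhead⟩ := hpre
  cases t with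
  | nil => exact absurd rfl hne
  | cons t0 rest =>
    cases rest with
    | nil =>
      simp [calculate, calculate_alt, PySem.List.slice_to_neg_one, PySem.List.slice_from_one,
        PySem.Str.join, PySem.List.pyGet?, PySem.List.pyIdx?]
    | cons i rest' =>
      have ht0 : t0 ≠ "" := hhead (by simp)
      obtain ⟨c, cs, hc⟩ : ∃ c cs, t0.toList = c :: cs := by
        cases h : t0.toList with
        | nil => exact absurd (String.toList_injective (by simp [h])) ht0
        | cons c cs => exact ⟨c, cs, rfl⟩
      have hs0 : PySem.Str.slice t0 (some 0) (some 1) = String.ofList [c] := pvSlice01 t0 c cs hc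
      have hmax0 : max "" (PySem.Str.slice t0 (some 0) (some 1)) =
          PySem.Str.slice t0 (some 0) (some 1) :=
        max_eq_right (le_of_not_gt (fun h => by
          have := String.lt_iff_toList_lt.mp h
          simp at this))
      show calculate (t0 :: i :: rest') = calculate_alt (t0 :: i :: rest')
      simp only [calculate, calculate_alt, PySem.List.slice_to_neg_one, PySem.List.slice_from_one]
      rw [pvRunFold]
      simp only [List.nil_append, List.tail_cons, List.dropLast_cons₂]
      conv_rhs => rw [pvRmx]
      rw [List.map_cons, hmax0]
      simp only [hs0]
      rw [pvZipRunmax]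
      have hget0 : PySem.List.pyGet? (t0 :: i :: rest') 0 = some t0 := by
        rw [show ((0 : Int)) = ((0 : Nat) : Int) by norm_num, PySem.List.pyGet?_natCast]
        rfl
      rw [hget0]
      exact pvKey (i :: rest') t0 c cs hc
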